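-- pv_equiv track=rewrite | github.com/navalvillote/TPV | metodos.py | obtener_listado_lineas
-- ===== SOURCE A (Python) =====
-- def obtener_listado_lineas(texto):
--     lista = texto.split('\n')
--     for i,linea in enumerate(lista):
--         if len(linea)<30:
--             delante=''
--             detras=''
--             sw=-1
--             for j in range(30-len(linea)):
--                 sw*=-1
--                 if sw==1:
--                     delante +=' '
--                 else:
--                     detras +=' '
--             lista[i]=delante + linea + detras
--     return lista
-- ===== SOURCE B (Python) =====
-- def obtener_listado_lineas(texto):
--     def centrar(linea):
--         if len(linea) >= 30:
--             return linea
--         p = 30 - len(linea)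
--         return ' ' * ((p + 1) // 2) + linea + ' ' * (p // 2)
--     return [centrar(linea) for linea in texto.split('\n')]
-- ===== Notes on version B (the rewrite author's own statement) =====
-- stated objective: simpler
-- what changed: Replaces the per-character alternating sign inner loop (building both pads one space at a time) with closed-form arithmetic: left pad = ceil(p/2), right pad = floor(p/2), built with string repetition in one comprehension.
import Mathlib
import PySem

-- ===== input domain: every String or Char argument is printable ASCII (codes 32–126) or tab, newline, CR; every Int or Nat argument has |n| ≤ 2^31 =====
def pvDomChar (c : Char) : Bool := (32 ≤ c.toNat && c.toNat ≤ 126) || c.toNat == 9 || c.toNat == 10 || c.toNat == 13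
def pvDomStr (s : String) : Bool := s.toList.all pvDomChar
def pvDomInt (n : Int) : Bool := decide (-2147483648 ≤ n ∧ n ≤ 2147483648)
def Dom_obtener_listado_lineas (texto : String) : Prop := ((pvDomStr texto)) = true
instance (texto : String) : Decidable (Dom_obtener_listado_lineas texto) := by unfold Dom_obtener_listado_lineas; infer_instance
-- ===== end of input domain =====

-- B pads short lines with closed-form arithmetic (left = ceil, right = floor) instead of A's
-- per-character alternating-sign loop; objective: simpler.

-- ===== PORT A =====
-- inner loop body: sw *= -1; if sw == 1 then delante += ' ' else detras += ' '
def pvLoopBodyA (st : List Char × List Char × Int) (_j : Int) : List Char × List Char × Int :=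
  let sw := st.2.2 * (-1)
  if sw = 1 then (st.1 ++ [' '], st.2.1, sw) else (st.1, st.2.1 ++ [' '], sw)

def obtener_listado_lineas (texto : String) : List String :=
  (PySem.Chars.splitOn texto.toList "\n".toList).map (fun linea =>
    if PySem.List.len linea < 30 then
      let r := (PySem.List.pyRange 0 (30 - PySem.List.len linea) 1).foldl pvLoopBodyA ([], [], -1)
      String.ofList (r.1 ++ linea ++ r.2.1)
    else String.ofList linea)

-- ===== PORT B =====
def pvCentrarB (cs : List Char) : String :=
  if 30 ≤ cs.length then String.ofList cs
  else
    let p := 30 - cs.length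
    String.ofList (List.replicate ((p + 1) / 2) ' ' ++ cs ++ List.replicate (p / 2) ' ')

def obtener_listado_lineas_alt (texto : String) : List String :=
  (PySem.Chars.splitOn texto.toList "\n".toList).map pvCentrarB

-- ===== PRECONDITION & SPEC =====
def Spec_obtener_listado_lineas (texto : String) (out : List String) : Prop := out = obtener_listado_lineas_alt texto
instance (texto : String) (out : List String) : Decidable (Spec_obtener_listado_lineas texto out) := by unfold Spec_obtener_listado_lineas; infer_instance

-- ===== CLAIM (what is proved, stated in full; the proofs are below) =====
def Claim_equal_obtener_listado_lineas : Prop := ∀ (texto : String), Dom_obtener_listado_lineas texto → Spec_obtener_listado_lineas texto (obtener_listado_lineas texto)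

-- ===== LEMMAS AND PROOFS =====
lemma pvLoopA_list {α : Type} (g : α → Int) (l : List α) :
    l.foldl (fun st j => pvLoopBodyA st (g j)) ([], [], -1) =
      (List.replicate ((l.length + 1) / 2) ' ', List.replicate (l.length / 2) ' ',
        if l.length % 2 = 1 then 1 else -1) := by
  induction l using List.reverseRecOn with
  | nil => simp
  | append_singleton xs x ih =>
    rw [List.foldl_append, ih]
    simp only [List.foldl_cons, List.foldl_nil, List.length_append, List.length_singleton]
    rcases Nat.even_or_odd xs.length with hk | hk
    · obtain ⟨m, hm⟩ := hk
      rw [hm]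
      have h0 : (m + m) % 2 = 0 := by omega
      simp [pvLoopBodyA, h0]
      refine ⟨?_, by omega, by omega⟩
      have he : (m + m + 1 + 1) / 2 = (m + m + 1) / 2 + 1 := by omega
      rw [he, List.replicate_succ']
    · obtain ⟨m, hm⟩ := hk
      rw [hm]
      have h1 : (2 * m + 1) % 2 = 1 := by omega
      simp [pvLoopBodyA, h1]
      refine ⟨by omega, ?_, by omega⟩
      have he : (2 * m + 1 + 1) / 2 = (2 * m + 1) / 2 + 1 := by omega
      rw [he, List.replicate_succ']

lemma pv_line_eq (linea : List Char) :
    (if PySem.List.len linea < 30 then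
      let r := (PySem.List.pyRange 0 (30 - PySem.List.len linea) 1).foldl pvLoopBodyA ([], [], -1)
      String.ofList (r.1 ++ linea ++ r.2.1)
    else String.ofList linea) = pvCentrarB linea := by
  unfold pvCentrarB
  have hlen : PySem.List.len linea = (linea.length : Int) := by simp
  by_cases h : PySem.List.len linea < 30
  · have hn : linea.length < 30 := by omega
    rw [if_pos h, if_neg (by omega)]
    have hp : (30 - PySem.List.len linea) = ((30 - linea.length : Nat) : Int) := by omega
    rw [hp, PySem.List.pyRange_zero_nat, List.foldl_map, pvLoopA_list (fun n : Nat => (n : Int))]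
    simp only [List.length_range]
  · rw [if_neg h, if_pos (by omega)]

theorem pv_spec_aux (texto : String) :
    obtener_listado_lineas texto = obtener_listado_lineas_alt texto := by
  unfold obtener_listado_lineas obtener_listado_lineas_alt
  exact List.map_congr_left (fun l _ => pv_line_eq l)

-- ===== VERDICT (by name: the statement is the Claim_ definition above) =====
theorem obtener_listado_lineas_spec : Claim_equal_obtener_listado_lineas := by
  intro texto _
  exact pv_spec_aux texto
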